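-- pv_equiv track=rewrite | github.com/hyunjun/practice | python/problem-ETC/get_maximum_in_generated_array.py | getMaximumGenerated0
-- ===== SOURCE A (Python) =====
-- def getMaximumGenerated0(n: int) -> int:
--     nums = []
--     for i in range(n + 1):
--         if 0 == i:
--             nums.append(0)
--         elif 1 == i:
--             nums.append(1)
--         elif i % 2 == 0:
--             nums.append(nums[i // 2])
--         else:
--             nums.append(nums[i // 2] + nums[i // 2 + 1])
--     return max(nums)
-- ===== SOURCE B (Python) =====
-- def getMaximumGenerated0(n: int) -> int:
--     memo = {}
--
--     def get(i):
--         if i < 2: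
--             return i
--         if i in memo:
--             return memo[i]
--         if i % 2 == 0:
--             v = get(i // 2)
--         else:
--             v = get(i // 2) + get(i // 2 + 1)
--         memo[i] = v
--         return v
--
--     return max(get(i) for i in range(n + 1))
-- ===== Notes on version B (the rewrite author's own statement) =====
-- stated objective: alternative
-- what changed: Replaces the forward-filled explicit array with a top-down memoized recursion on the halved index; no list is materialized and the maximum is taken over a generator.
import Mathlib
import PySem

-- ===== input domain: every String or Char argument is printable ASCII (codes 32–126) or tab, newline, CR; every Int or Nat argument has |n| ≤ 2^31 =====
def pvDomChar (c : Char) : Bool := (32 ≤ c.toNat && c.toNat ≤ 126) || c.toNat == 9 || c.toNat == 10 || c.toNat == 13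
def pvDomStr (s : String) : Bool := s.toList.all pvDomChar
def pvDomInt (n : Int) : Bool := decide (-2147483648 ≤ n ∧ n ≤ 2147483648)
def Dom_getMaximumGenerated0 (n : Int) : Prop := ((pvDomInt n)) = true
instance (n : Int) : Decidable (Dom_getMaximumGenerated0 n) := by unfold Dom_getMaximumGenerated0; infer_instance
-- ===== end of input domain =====

-- B replaces A's forward-filled array with a top-down memoized recursion on the halved index (alternative decomposition, same cost).

-- ===== PORT A =====
-- loop body of A; the list indices are always in range while the loop runs, so getD's default is never used
def stepA (nums : List Int) (i : Int) : List Int :=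
  if (0 : Int) = i then nums ++ [0]
  else if (1 : Int) = i then nums ++ [1]
  else if PySem.Int.mod i 2 = 0 then
    nums ++ [(PySem.List.pyGet? nums (PySem.Int.floordiv i 2)).getD 0]
  else
    nums ++ [(PySem.List.pyGet? nums (PySem.Int.floordiv i 2)).getD 0
             + (PySem.List.pyGet? nums (PySem.Int.floordiv i 2 + 1)).getD 0]

-- max([]) raises ValueError in Python; Pre_ excludes n < 0, the only case with an empty list
def getMaximumGenerated0 (n : Int) : Int :=
  let nums := (PySem.List.pyRange 0 (n + 1) 1).foldl stepA []
  (PySem.List.max? nums (fun y => y)).getD 0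

-- ===== PORT B =====
-- Source B's get(i): called only on i ≥ 0, so the Nat recursion is an exact port (memoization does not change the value)
def pvGet (i : Nat) : Int :=
  if i < 2 then (i : Int)
  else if i % 2 = 0 then pvGet (i / 2)
  else pvGet (i / 2) + pvGet (i / 2 + 1)
termination_by i
decreasing_by all_goals omega

def getMaximumGenerated0_alt (n : Int) : Int :=
  (PySem.List.max? ((PySem.List.pyRange 0 (n + 1) 1).map (fun i => pvGet i.toNat))
    (fun y => y)).getD 0

-- ===== PRECONDITION & SPEC =====
-- Pre_ excludes n < 0, where both Pythons raise ValueError (max() of an empty sequence)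
def Pre_getMaximumGenerated0 (n : Int) : Prop := 0 ≤ n
instance (n : Int) : Decidable (Pre_getMaximumGenerated0 n) := by unfold Pre_getMaximumGenerated0; infer_instance
def pvWitness_getMaximumGenerated0 : Int := (5)

def Spec_getMaximumGenerated0 (n : Int) (out : Int) : Prop := out = getMaximumGenerated0_alt n
instance (n : Int) (out : Int) : Decidable (Spec_getMaximumGenerated0 n out) := by unfold Spec_getMaximumGenerated0; infer_instance

-- ===== CLAIM (what is proved, stated in full; the proofs are below) =====
def Claim_equal_getMaximumGenerated0 : Prop := ∀ (n : Int), Dom_getMaximumGenerated0 n → Pre_getMaximumGenerated0 n → Spec_getMaximumGenerated0 n (getMaximumGenerated0 n)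

-- ===== LEMMAS AND PROOFS =====

-- the step of A's loop, applied on the list of already-computed values, appends pvGet m
lemma stepA_eq (m : Nat) :
    stepA ((List.range m).map pvGet) (m : Int) = (List.range (m + 1)).map pvGet := by
  rw [List.range_succ, List.map_append]
  match m with
  | 0 => simp [stepA, pvGet]
  | 1 => simp [stepA, pvGet]
  | (k + 2) =>
    have h2 : 2 ≤ k + 2 := by omega
    have hm2 : PySem.Int.mod ((k + 2 : Nat) : Int) 2 = (((k + 2) % 2 : Nat) : Int) :=
      PySem.Int.mod_natCast _ _
    have hd2 : PySem.Int.floordiv ((k + 2 : Nat) : Int) 2 = (((k + 2) / 2 : Nat) : Int) :=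
      PySem.Int.floordiv_natCast _ _
    unfold stepA
    rw [if_neg (by omega), if_neg (by omega), hm2, hd2]
    by_cases hpar : (k + 2) % 2 = 0
    · rw [if_pos (by exact_mod_cast hpar)]
      have hlt : (k + 2) / 2 < k + 2 := by omega
      simp only [PySem.List.pyGet?_natCast, List.getElem?_map, List.getElem?_range, hlt,
        Option.map_some, Option.getD_some]
      have : pvGet (k + 2) = pvGet ((k + 2) / 2) := by
        rw [pvGet, if_neg (by omega), if_pos hpar]
      simp [this]
    · have hlt : (k + 2) / 2 < k + 2 := by omega
      have hlt1 : (k + 2) / 2 + 1 < k + 2 := by omega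
      have harg : (((k + 2) / 2 : Nat) : Int) + 1 = (((k + 2) / 2 + 1 : Nat) : Int) := by
        push_cast; ring
      rw [if_neg (by exact_mod_cast hpar), harg]
      have hv : pvGet (k + 2) = pvGet ((k + 2) / 2) + pvGet ((k + 2) / 2 + 1) := by
        rw [pvGet, if_neg (by omega), if_neg hpar]
      simp only [PySem.List.pyGet?_natCast, List.getElem?_map, List.getElem?_range, hlt, hlt1,
        Option.map_some, Option.getD_some]
      simp [hv]

-- A's loop builds exactly the table of pvGet values
lemma build_eq (m : Nat) :
    (PySem.List.pyRange 0 (m : Int) 1).foldl stepA [] = (List.range m).map pvGet := by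
  induction m with
  | zero => simp [PySem.List.pyRange_one_eq_nil]
  | succ k ih =>
    have : ((k + 1 : Nat) : Int) = (k : Int) + 1 := by push_cast; ring
    rw [this, PySem.List.pyRange_one_succ_right (by positivity), List.foldl_append, ih]
    simpa using stepA_eq k

-- B's comprehension over range(n+1) is the same table of pvGet values
lemma bmap_eq (m : Nat) :
    (PySem.List.pyRange 0 (m : Int) 1).map (fun i => pvGet i.toNat) = (List.range m).map pvGet := by
  rw [PySem.List.pyRange_one, List.map_map]
  simp [Function.comp_def]

-- ===== VERDICT (by name: the statement is the Claim_ definition above) =====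
theorem getMaximumGenerated0_spec : Claim_equal_getMaximumGenerated0 := by
  intro n _ hn
  have hn' : 0 ≤ n := hn
  unfold Spec_getMaximumGenerated0 getMaximumGenerated0 getMaximumGenerated0_alt
  have hm : (n + 1) = (((n + 1).toNat : Nat) : Int) := by omega
  rw [hm, build_eq, bmap_eq]
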